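-- pv_equiv track=rewrite | github.com/qianandfei/UniKDD | BertUtils.py | truncate_lists_drop_tail
-- ===== SOURCE A (Python) =====
-- import copy
--
-- def truncate_lists_drop_tail(ls:list,maxLen:int):
--     ls=copy.deepcopy(ls)#不要破坏原始的
--     ls.sort(key=lambda x:len(x))
--     assert maxLen>=0
--     sumLen=sum([len(i) for i in ls])
--     if sumLen<=maxLen:
--         return ls
--     ans=[]
--     now_len=0
--     for i in ls:
--         if now_len+len(i)<maxLen:
--             now_len+=len(i)
--             ans.append(i)
--         else:
--             ans.append(i[:maxLen-now_len])
--             break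
--     return ans
-- ===== SOURCE B (Python) =====
-- import copy
-- from itertools import accumulate
-- from bisect import bisect_left
--
-- def truncate_lists_drop_tail(ls: list, maxLen: int):
--     ls = copy.deepcopy(ls)  # keep the caller's list intact
--     ls.sort(key=len)
--     assert maxLen >= 0
--     pre = list(accumulate(len(x) for x in ls))
--     if not pre or pre[-1] <= maxLen:
--         return ls
--     j = bisect_left(pre, maxLen)  # first index whose cumulative length reaches maxLen
--     before = pre[j - 1] if j else 0
--     return ls[:j] + [ls[j][:maxLen - before]]
-- ===== Notes on version B (the rewrite author's own statement) =====
-- stated objective: alternative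
-- what changed: Replaces A's running-counter greedy scan with a prefix-sum table plus a bisect binary search for the cut index, then returns ls[:j] concatenated with the sliced crossing element.
import Mathlib
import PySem

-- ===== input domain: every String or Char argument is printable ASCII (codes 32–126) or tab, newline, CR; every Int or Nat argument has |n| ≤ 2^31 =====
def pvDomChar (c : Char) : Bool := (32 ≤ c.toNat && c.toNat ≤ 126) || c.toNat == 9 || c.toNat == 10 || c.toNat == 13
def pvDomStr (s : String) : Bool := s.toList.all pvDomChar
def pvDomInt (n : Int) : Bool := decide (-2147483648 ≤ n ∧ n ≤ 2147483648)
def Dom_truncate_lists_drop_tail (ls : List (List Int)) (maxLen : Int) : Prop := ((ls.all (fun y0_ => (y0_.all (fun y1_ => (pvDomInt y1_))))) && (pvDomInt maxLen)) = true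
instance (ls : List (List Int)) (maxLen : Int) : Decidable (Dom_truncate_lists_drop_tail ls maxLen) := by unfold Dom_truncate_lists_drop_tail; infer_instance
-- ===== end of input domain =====

-- ===== PORT A =====
-- B changes A's running-counter greedy scan into prefix sums + first-index search; alternative decomposition, same cost.
-- aLoop: A's `for i in ls:` loop with early break; ans accumulated reversed.
def pvALoop (maxLen : Int) : List (List Int) → Int → List (List Int) → List (List Int)
  | [], _, ans => ans.reverse
  | i :: rest, now_len, ans =>
      if now_len + (i.length : Int) < maxLen then
        pvALoop maxLen rest (now_len + (i.length : Int)) (i :: ans)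
      else
        ans.reverse ++ [PySem.List.slice i none (some (maxLen - now_len))]

def truncate_lists_drop_tail (ls : List (List Int)) (maxLen : Int) : List (List Int) :=
  let ls := PySem.List.sorted ls (fun x => (x.length : Int))
  let sumLen : Int := (ls.map (fun i => (i.length : Int))).sum
  if sumLen ≤ maxLen then ls
  else pvALoop maxLen ls 0 []

-- ===== PORT B =====
-- pvAccum: itertools.accumulate of the element lengths (running sums, no initial element).
def pvAccum (acc : Int) : List (List Int) → List Int
  | [] => []
  | x :: r => (acc + (x.length : Int)) :: pvAccum (acc + (x.length : Int)) r

def truncate_lists_drop_tail_alt (ls : List (List Int)) (maxLen : Int) : List (List Int) :=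
  let ls := PySem.List.sorted ls (fun x => (x.length : Int))
  let pre := pvAccum 0 ls
  if pre.isEmpty || pre.getLastD 0 ≤ maxLen then ls
  else
    -- bisect_left(pre, maxLen) on the sorted prefix-sum list = first index with maxLen ≤ pre[j]
    let j := pre.findIdx (fun p => maxLen ≤ p)
    let before := if j = 0 then 0 else pre.getD (j - 1) 0
    ls.take j ++ [PySem.List.slice (ls.getD j []) none (some (maxLen - before))]

-- ===== PRECONDITION & SPEC =====
-- A asserts maxLen >= 0 and raises AssertionError otherwise; Pre_ excludes exactly that.
def Pre_truncate_lists_drop_tail (ls : List (List Int)) (maxLen : Int) : Prop := 0 ≤ maxLen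
instance (ls : List (List Int)) (maxLen : Int) : Decidable (Pre_truncate_lists_drop_tail ls maxLen) := by unfold Pre_truncate_lists_drop_tail; infer_instance
def pvWitness_truncate_lists_drop_tail : List (List Int) × Int := ([[1, 2], [3]], 2)

def Spec_truncate_lists_drop_tail (ls : List (List Int)) (maxLen : Int) (out : List (List Int)) : Prop := out = truncate_lists_drop_tail_alt ls maxLen
instance (ls : List (List Int)) (maxLen : Int) (out : List (List Int)) : Decidable (Spec_truncate_lists_drop_tail ls maxLen out) := by unfold Spec_truncate_lists_drop_tail; infer_instance

-- ===== CLAIM (what is proved, stated in full; the proofs are below) =====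
def Claim_equal_truncate_lists_drop_tail : Prop := ∀ (ls : List (List Int)) (maxLen : Int), Dom_truncate_lists_drop_tail ls maxLen → Pre_truncate_lists_drop_tail ls maxLen → Spec_truncate_lists_drop_tail ls maxLen (truncate_lists_drop_tail ls maxLen)

-- ===== LEMMAS AND PROOFS =====

lemma pvAccum_eq_nil (now : Int) (s : List (List Int)) : pvAccum now s = [] ↔ s = [] := by
  cases s <;> simp [pvAccum]

lemma pvAccum_getLast? (s : List (List Int)) : ∀ now : Int, s ≠ [] →
    (pvAccum now s).getLast? = some (now + (s.map (fun i => (i.length : Int))).sum) := by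
  induction s with
  | nil => intro now h; exact absurd rfl h
  | cons x r ih =>
      intro now _
      by_cases hr : r = []
      · subst hr; simp [pvAccum]
      · have h := ih (now + (x.length : Int)) hr
        cases hpa : pvAccum (now + (x.length : Int)) r with
        | nil => exact absurd ((pvAccum_eq_nil _ _).mp hpa) hr
        | cons a t =>
            rw [hpa] at h
            simp only [pvAccum, hpa, List.getLast?_cons_cons, h, Option.some.injEq,
              List.map_cons, List.sum_cons]
            ring

lemma pvLoop_eq (maxLen : Int) (s : List (List Int)) : ∀ (now : Int) (ans : List (List Int)),
    now ≤ maxLen → maxLen < now + (s.map (fun i => (i.length : Int))).sum →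
    pvALoop maxLen s now ans =
      ans.reverse ++
        (let pre := pvAccum now s
         let j := pre.findIdx (fun p => maxLen ≤ p)
         let before := if j = 0 then now else pre.getD (j - 1) 0
         s.take j ++ [PySem.List.slice (s.getD j []) none (some (maxLen - before))]) := by
  induction s with
  | nil =>
      intro now ans h1 h2
      simp at h2; omega
  | cons i rest ih =>
      intro now ans h1 h2
      by_cases hc : now + (i.length : Int) < maxLen
      · -- full element taken, recurse
        have h2' : maxLen < (now + (i.length : Int)) + (rest.map (fun i => (i.length : Int))).sum := by
          simp [List.sum_cons] at h2; omega
        have := ih (now + (i.length : Int)) (i :: ans) (le_of_lt hc) h2'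
        rw [pvALoop, if_pos hc, this]
        have hpred : (decide (maxLen ≤ now + (i.length : Int))) = false := by
          simp; omega
        simp only [pvAccum, List.findIdx_cons, hpred, cond_false]
        set j' := (pvAccum (now + (i.length : Int)) rest).findIdx (fun p => decide (maxLen ≤ p)) with hj'
        simp only [List.take_succ_cons, List.getD_cons_succ]
        have hbefore : (if j' + 1 = 0 then now
            else ((now + (i.length : Int)) :: pvAccum (now + (i.length : Int)) rest).getD (j' + 1 - 1) 0)
            = (if j' = 0 then now + (i.length : Int) else (pvAccum (now + (i.length : Int)) rest).getD (j' - 1) 0) := by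
          cases hj0 : j' with
          | zero => simp
          | succ k => simp
        rw [hbefore]
        simp
      · -- break here
        push_neg at hc
        rw [pvALoop, if_neg (by omega)]
        have hpred : (decide (maxLen ≤ now + (i.length : Int))) = true := by simp; omega
        simp only [pvAccum, List.findIdx_cons, hpred, cond_true]
        simp

-- ===== VERDICT (by name: the statement is the Claim_ definition above) =====
theorem truncate_lists_drop_tail_spec : Claim_equal_truncate_lists_drop_tail := by
  intro ls maxLen _ hpre
  have hpre' : (0 : Int) ≤ maxLen := hpre
  unfold Spec_truncate_lists_drop_tail truncate_lists_drop_tail truncate_lists_drop_tail_alt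
  set s := PySem.List.sorted ls (fun x => (x.length : Int)) with hs
  set sumLen : Int := (s.map (fun i => (i.length : Int))).sum with hsum
  have hlast : s ≠ [] → (pvAccum 0 s).getLast?.getD 0 = sumLen := fun h => by
    rw [pvAccum_getLast? s 0 h]; simpa using hsum.symm
  by_cases hle : sumLen ≤ maxLen
  · -- both return the sorted list
    rw [if_pos hle]
    by_cases hne : s = []
    · have hempty : (pvAccum 0 s).isEmpty = true := by simp [hne, pvAccum]
      simp [hempty]
    · have hg : ((pvAccum 0 s).isEmpty || decide ((pvAccum 0 s).getLastD 0 ≤ maxLen)) = true := by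
        simp [List.getLastD_eq_getLast?, hlast hne, hle]
      simp only [hg]
      simp
  · push_neg at hle
    rw [if_neg (not_le.mpr hle)]
    have hne : s ≠ [] := fun h => by
      rw [h] at hsum; simp at hsum; omega
    have hguard : ((pvAccum 0 s).isEmpty || decide ((pvAccum 0 s).getLastD 0 ≤ maxLen)) = false := by
      simp [List.isEmpty_iff, pvAccum_eq_nil, hne, List.getLastD_eq_getLast?, hlast hne]
      omega
    simp only [hguard, Bool.false_eq_true, if_false]
    have := pvLoop_eq maxLen s 0 [] hpre' (by omega)
    simpa using this
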